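-- pv_equiv track=rewrite | github.com/shushi1010/hermes-portfolio-sentinel | reextract_affiliations.py | merge_hyphen_lines
-- ===== SOURCE A (Python) =====
-- def merge_hyphen_lines(lines: list[str]) -> list[str]:
--     merged: list[str] = []
--     i = 0
--     while i < len(lines):
--         line = lines[i].rstrip()
--         while line.endswith("-") and i + 1 < len(lines):
--             nxt = lines[i + 1].lstrip()
--             line = line[:-1] + nxt
--             i += 1
--         merged.append(line)
--         i += 1
--     return merged
-- ===== SOURCE B (Python) =====
-- def merge_hyphen_lines(lines: list[str]) -> list[str]:
--     merged: list[str] = []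
--     pending = None
--     n = len(lines)
--     for idx, line in enumerate(lines):
--         cur = line.rstrip() if pending is None else pending + line.lstrip()
--         if cur.endswith("-") and idx + 1 < n:
--             pending = cur[:-1]
--         else:
--             merged.append(cur)
--             pending = None
--     return merged
-- ===== Notes on version B (the rewrite author's own statement) =====
-- stated objective: simpler
-- what changed: Replaced the nested while-loops with manual index arithmetic by a single forward pass over enumerate(lines) that threads a 'pending' merged-prefix accumulator, appending to the result when the current line no longer ends in a hyphen or is the last line.
import Mathlib
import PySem

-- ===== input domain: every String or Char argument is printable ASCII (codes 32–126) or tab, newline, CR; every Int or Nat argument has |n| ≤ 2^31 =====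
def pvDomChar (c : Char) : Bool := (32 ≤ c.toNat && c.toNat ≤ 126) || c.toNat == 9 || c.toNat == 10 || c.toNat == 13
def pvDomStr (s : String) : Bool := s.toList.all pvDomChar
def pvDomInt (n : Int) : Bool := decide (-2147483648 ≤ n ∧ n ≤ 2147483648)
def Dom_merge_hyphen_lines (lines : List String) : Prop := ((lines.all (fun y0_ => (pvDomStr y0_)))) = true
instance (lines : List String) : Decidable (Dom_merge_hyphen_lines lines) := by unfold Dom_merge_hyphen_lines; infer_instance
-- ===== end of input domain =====

-- B replaces A's nested while-loops with one forward pass threading a 'pending' accumulator (objective: simpler).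

-- ===== PORT A =====
-- inner 'while line.endswith("-") and i + 1 < len(lines)' loop: consumes lines from 'rest'
def mhlInner (line : String) (rest : List String) : String × List String :=
  match rest with
  | [] => (line, [])
  | nxt :: rest' =>
    if PySem.Str.endswith line "-" = true then
      mhlInner (PySem.Str.slice line none (some (-1)) ++ PySem.Str.lstrip nxt) rest'
    else (line, nxt :: rest')

theorem mhlInner_len (rest : List String) (line : String) :
    (mhlInner line rest).2.length ≤ rest.length := by
  induction rest generalizing line with
  | nil => simp [mhlInner]
  | cons x xs ih =>
    simp only [mhlInner]
    split
    · exact le_trans (ih _) (Nat.le_succ _)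
    · simp

def merge_hyphen_lines (lines : List String) : List String :=
  match lines with
  | [] => []
  | l :: rest =>
    let p := mhlInner (PySem.Str.rstrip l) rest
    p.1 :: merge_hyphen_lines p.2
termination_by lines.length
decreasing_by
  simpa using Nat.lt_succ_of_le (mhlInner_len rest (PySem.Str.rstrip l))

-- ===== PORT B =====
-- one step of B's for-loop over enumerate(lines); state = (merged, pending)
def mhlStep (n : Int) (st : List String × Option String) (p : Int × String) :
    List String × Option String :=
  let cur := match st.2 with
    | none => PySem.Str.rstrip p.2
    | some pend => pend ++ PySem.Str.lstrip p.2
  if PySem.Str.endswith cur "-" = true ∧ p.1 + 1 < n then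
    (st.1, some (PySem.Str.slice cur none (some (-1))))
  else (st.1 ++ [cur], none)

def merge_hyphen_lines_alt (lines : List String) : List String :=
  ((PySem.List.enumerate lines 0).foldl (mhlStep (lines.length : Int)) ([], none)).1

-- ===== PRECONDITION & SPEC =====
def Spec_merge_hyphen_lines (lines : List String) (out : List String) : Prop := out = merge_hyphen_lines_alt lines
instance (lines : List String) (out : List String) : Decidable (Spec_merge_hyphen_lines lines out) := by unfold Spec_merge_hyphen_lines; infer_instance

-- ===== CLAIM (what is proved, stated in full; the proofs are below) =====
def Claim_equal_merge_hyphen_lines : Prop := ∀ (lines : List String), Dom_merge_hyphen_lines lines → Spec_merge_hyphen_lines lines (merge_hyphen_lines lines)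

-- ===== LEMMAS AND PROOFS =====

-- common reference recursion: process lines with an optional pending prefix
def mhlRec : List String → Option String → List String
  | [], _ => []
  | x :: xs, pend =>
    let cur := match pend with
      | none => PySem.Str.rstrip x
      | some p => p ++ PySem.Str.lstrip x
    if PySem.Str.endswith cur "-" = true ∧ xs ≠ [] then
      mhlRec xs (some (PySem.Str.slice cur none (some (-1))))
    else cur :: mhlRec xs none

theorem mhlInner_spec (xs : List String) (cur : String) :
    (mhlInner cur xs).1 :: merge_hyphen_lines (mhlInner cur xs).2 =
      (if PySem.Str.endswith cur "-" = true ∧ xs ≠ [] then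
        mhlRec xs (some (PySem.Str.slice cur none (some (-1))))
      else cur :: mhlRec xs none) := by
  induction xs generalizing cur with
  | nil => simp [mhlInner, merge_hyphen_lines, mhlRec]
  | cons x xs' ih =>
    by_cases h : PySem.Str.endswith cur "-" = true
    · have h1 : (PySem.Str.endswith cur "-" = true ∧ x :: xs' ≠ []) := ⟨h, by simp⟩
      rw [if_pos h1]
      simp only [mhlInner, if_pos h, mhlRec]
      exact ih _
    · have h1 : ¬ (PySem.Str.endswith cur "-" = true ∧ x :: xs' ≠ []) := fun hc => h hc.1
      rw [if_neg h1]
      simp only [mhlInner, if_neg h]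
      congr 1
      rw [merge_hyphen_lines]
      simpa [mhlRec] using ih (PySem.Str.rstrip x)

theorem merge_eq_mhlRec (xs : List String) : merge_hyphen_lines xs = mhlRec xs none := by
  cases xs with
  | nil => simp [merge_hyphen_lines, mhlRec]
  | cons x xs' =>
    rw [merge_hyphen_lines]
    simpa [mhlRec] using mhlInner_spec xs' (PySem.Str.rstrip x)

theorem foldl_mhlStep_core (n : Int) (xs' : List String) (k : Int)
    (acc : List String) (cur : String) (hn : k + 1 + (xs'.length : Int) = n)
    (ih : ∀ (k : Int) (acc : List String) (pend : Option String), k + xs'.length = n →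
      ((PySem.List.enumerate xs' k).foldl (mhlStep n) (acc, pend)).1 = acc ++ mhlRec xs' pend) :
    ((PySem.List.enumerate xs' (k + 1)).foldl (mhlStep n)
      (if PySem.Str.endswith cur "-" = true ∧ k + 1 < n then
        (acc, some (PySem.Str.slice cur none (some (-1))))
      else (acc ++ [cur], none))).1 =
      acc ++ (if PySem.Str.endswith cur "-" = true ∧ xs' ≠ [] then
        mhlRec xs' (some (PySem.Str.slice cur none (some (-1))))
      else cur :: mhlRec xs' none) := by
  have hcond : (k + 1 < n) ↔ xs' ≠ [] := by
    constructor
    · intro h hx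
      rw [hx] at hn; simp at hn; omega
    · intro h
      have h0 : xs'.length ≠ 0 := by simpa [List.length_eq_zero_iff] using h
      omega
  by_cases h : PySem.Str.endswith cur "-" = true ∧ xs' ≠ []
  · rw [if_pos ⟨h.1, hcond.mpr h.2⟩, if_pos h]
    exact ih (k + 1) acc _ (by omega)
  · have h' : ¬ (PySem.Str.endswith cur "-" = true ∧ k + 1 < n) := by
      intro hc; exact h ⟨hc.1, hcond.mp hc.2⟩
    rw [if_neg h', if_neg h]
    rw [ih (k + 1) _ none (by omega)]
    simp

theorem foldl_mhlStep (n : Int) (xs : List String) (k : Int)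
    (acc : List String) (pend : Option String) (hn : k + xs.length = n) :
    ((PySem.List.enumerate xs k).foldl (mhlStep n) (acc, pend)).1 = acc ++ mhlRec xs pend := by
  induction xs generalizing k acc pend with
  | nil => simp [PySem.List.enumerate_nil, mhlRec]
  | cons x xs' ih =>
    rw [PySem.List.enumerate_cons]
    simp only [List.foldl_cons]
    have hn' : k + 1 + (xs'.length : Int) = n := by simp at hn; omega
    cases pend with
    | none =>
      rw [mhlRec]
      simpa only [mhlStep] using foldl_mhlStep_core n xs' k acc (PySem.Str.rstrip x) hn' ih
    | some p =>
      rw [mhlRec]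
      simpa only [mhlStep] using foldl_mhlStep_core n xs' k acc (p ++ PySem.Str.lstrip x) hn' ih

theorem alt_eq_mhlRec (xs : List String) : merge_hyphen_lines_alt xs = mhlRec xs none := by
  unfold merge_hyphen_lines_alt
  simpa using foldl_mhlStep (xs.length : Int) xs 0 [] none (by simp)

-- ===== VERDICT (by name: the statement is the Claim_ definition above) =====
theorem merge_hyphen_lines_spec : Claim_equal_merge_hyphen_lines := by
  intro lines _
  unfold Spec_merge_hyphen_lines
  rw [merge_eq_mhlRec, alt_eq_mhlRec]
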